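-- pv_equiv track=rewrite | github.com/FEIPNG/kernel_data_challenge | svm_substring_all_files_one_time.py | substring_kernel
-- ===== SOURCE A (Python) =====
-- def substring_kernel(s1: str, s2: str, k: int) -> int:
--     """
--     计算两个DNA序列的substring kernel值
--
--     参数:
--         s1, s2 (str): 输入的两个DNA序列
--         k (int): 子串长度
--
--     返回:
--         int: kernel值（两个序列k-length子串的共现次数加权和）
--     """
--     # 预处理：转换为大写并验证DNA字符
--     s1 = s1.upper()
--     s2 = s2.upper()
--
--     # 检查k的合法性
--     if k <= 0 or k > len(s1) or k > len(s2):
--         return 0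
--
--     # 生成子串频次字典
--     def count_substrings(s: str) -> dict:
--         counts = {}
--         for i in range(len(s) - k + 1):
--             substr = s[i:i+k]
--             counts[substr] = counts.get(substr, 0) + 1
--         return counts
--
--     count1 = count_substrings(s1)
--     count2 = count_substrings(s2)
--
--     # 计算点积
--     kernel_value = 0
--     for substr, cnt1 in count1.items():
--         cnt2 = count2.get(substr, 0)
--         kernel_value += cnt1 * cnt2
--     return kernel_value
-- ===== SOURCE B (Python) =====
-- def substring_kernel(s1: str, s2: str, k: int) -> int:
--     """Substring kernel by direct pairwise window comparison: no count dicts at all,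
--     count matching (i, j) window pairs with nested loops."""
--     s1 = s1.upper()
--     s2 = s2.upper()
--     if k <= 0 or k > len(s1) or k > len(s2):
--         return 0
--     total = 0
--     for i in range(len(s1) - k + 1):
--         w = s1[i:i+k]
--         for j in range(len(s2) - k + 1):
--             if w == s2[j:j+k]:
--                 total += 1
--     return total
-- ===== Notes on version B (the rewrite author's own statement) =====
-- stated objective: alternative
-- what changed: B drops the count dictionaries entirely and counts matching window pairs directly with a nested loop over all (i, j) window positions; correct because the dot product of the two k-mer count vectors equals the number of equal window pairs.
import Mathlib
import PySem

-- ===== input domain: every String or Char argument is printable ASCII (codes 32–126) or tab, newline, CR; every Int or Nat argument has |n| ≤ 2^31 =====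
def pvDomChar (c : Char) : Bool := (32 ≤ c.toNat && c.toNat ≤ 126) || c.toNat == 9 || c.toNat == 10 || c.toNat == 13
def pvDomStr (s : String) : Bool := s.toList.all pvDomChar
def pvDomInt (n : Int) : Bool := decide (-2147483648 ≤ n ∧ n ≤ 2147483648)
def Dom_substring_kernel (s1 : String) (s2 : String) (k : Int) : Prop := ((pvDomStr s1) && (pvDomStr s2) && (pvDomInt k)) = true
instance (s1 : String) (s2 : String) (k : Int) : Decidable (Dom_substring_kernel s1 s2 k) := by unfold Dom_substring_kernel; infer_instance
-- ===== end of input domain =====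

-- B drops the count dictionaries and counts matching (i, j) window pairs directly with nested loops (alternative decomposition; same guard and upper() preprocessing).


-- ===== PORT A =====
-- A's inner helper count_substrings: dict of k-substring counts via counts[sub] = counts.get(sub,0)+1
def skCount (s : List Char) (k : Int) : PySem.Dict String Int :=
  (PySem.List.pyRange 0 (PySem.Chars.len s - k + 1) 1).foldl
    (fun d i =>
      d.insert (String.ofList (PySem.List.slice s (some i) (some (i + k))))
        ((d.getD (String.ofList (PySem.List.slice s (some i) (some (i + k)))) 0) + 1))
    PySem.Dict.empty

def substring_kernel (s1 : String) (s2 : String) (k : Int) : Int :=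
  let t1 := PySem.Chars.upper s1.toList
  let t2 := PySem.Chars.upper s2.toList
  if k ≤ 0 ∨ k > PySem.Chars.len t1 ∨ k > PySem.Chars.len t2 then 0
  else
    let count1 := skCount t1 k
    let count2 := skCount t2 k
    count1.items.foldl (fun acc p => acc + p.2 * count2.getD p.1 0) 0

-- ===== PORT B =====
def substring_kernel_alt (s1 : String) (s2 : String) (k : Int) : Int :=
  let t1 := PySem.Chars.upper s1.toList
  let t2 := PySem.Chars.upper s2.toList
  if k ≤ 0 ∨ k > PySem.Chars.len t1 ∨ k > PySem.Chars.len t2 then 0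
  else
    (PySem.List.pyRange 0 (PySem.Chars.len t1 - k + 1) 1).foldl
      (fun total i =>
        let w := String.ofList (PySem.List.slice t1 (some i) (some (i + k)))
        (PySem.List.pyRange 0 (PySem.Chars.len t2 - k + 1) 1).foldl
          (fun t j =>
            if w = String.ofList (PySem.List.slice t2 (some j) (some (j + k))) then t + 1 else t)
          total)
      0

-- ===== PRECONDITION & SPEC =====
def Spec_substring_kernel (s1 : String) (s2 : String) (k : Int) (out : Int) : Prop := out = substring_kernel_alt s1 s2 k
instance (s1 : String) (s2 : String) (k : Int) (out : Int) : Decidable (Spec_substring_kernel s1 s2 k out) := by unfold Spec_substring_kernel; infer_instance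

-- ===== CLAIM =====
def Claim_equal_substring_kernel : Prop := ∀ (s1 : String) (s2 : String) (k : Int), Dom_substring_kernel s1 s2 k → Spec_substring_kernel s1 s2 k (substring_kernel s1 s2 k)

-- ===== LEMMAS AND PROOFS =====

-- the list of k-windows of s, in order
def skWindows (s : List Char) (k : Int) : List String :=
  (PySem.List.pyRange 0 (PySem.Chars.len s - k + 1) 1).map
    (fun i => String.ofList (PySem.List.slice s (some i) (some (i + k))))

lemma skCount_eq_counter (s : List Char) (k : Int) :
    skCount s k = PySem.Dict.counter (skWindows s k) := by
  rw [skCount, skWindows, ← PySem.Dict.foldl_insert_getD_add_one_eq_counter, List.foldl_map]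

-- Σ over a nodup list of (if s = w then f s else 0) collapses to a single term
lemma sum_map_filter_single (l : List String) (w : String) (f : String → Int) (hnd : l.Nodup) :
    (l.map (fun s => if s = w then f s else 0)).sum = if w ∈ l then f w else 0 := by
  induction l with
  | nil => simp
  | cons x xs ih =>
    simp only [List.nodup_cons] at hnd
    simp only [List.map_cons, List.sum_cons, ih hnd.2, List.mem_cons]
    by_cases hx : x = w
    · subst hx
      simp [hnd.1]
    · simp [hx, Ne.symm hx]

-- Σ_{v ∈ l} [w = v] = count of w in l
lemma sum_indicator_count (l : List String) (w : String) :
    (l.map (fun v => if w = v then (1 : Int) else 0)).sum = (l.count w : Int) := by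
  induction l with
  | nil => simp
  | cons x xs ih =>
    by_cases hx : w = x
    · subst hx
      simp [ih, add_comm]
    · simp [hx, Ne.symm hx, ih]

-- double counting: Σ_{sub ∈ dedup W1} count1(sub)*count2(sub) = Σ_{w ∈ W2} count1(w)
lemma double_count (W1 W2 : List String) :
    ((PySem.Set.ofList W1).map (fun s => (W1.count s : Int) * (W2.count s : Int))).sum
      = (W2.map (fun w => (W1.count w : Int))).sum := by
  induction W2 with
  | nil => simp
  | cons w rest ih =>
    simp only [List.count_cons, List.map_cons, List.sum_cons]
    have hfun : ∀ s ∈ PySem.Set.ofList W1,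
        ((W1.count s : Int) * ((rest.count s + if (w == s) then 1 else 0 : Nat) : Int))
          = (W1.count s : Int) * (rest.count s : Int) + (if s = w then (W1.count s : Int) else 0) := by
      intro s _
      by_cases hs : s = w
      · subst hs
        push_cast [beq_self_eq_true]
        simp [mul_add]
      · have : (w == s) = false := by simpa [beq_eq_false_iff_ne] using fun h => hs h.symm
        simp [this, hs]
    rw [List.map_congr_left hfun, PySem.List.sum_map_add_int,
        sum_map_filter_single _ _ _ (PySem.Set.nodup_ofList W1), ih]
    by_cases hw : w ∈ W1
    · simp only [PySem.Set.mem_ofList, hw, if_pos]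
      ring
    · simp [PySem.Set.mem_ofList, hw, List.count_eq_zero_of_not_mem hw]

-- count symmetry: Σ_{w ∈ W1} count_{W2}(w) = Σ_{v ∈ W2} count_{W1}(v)
lemma sum_count_symm (W1 W2 : List String) :
    (W1.map (fun w => (W2.count w : Int))).sum = (W2.map (fun v => (W1.count v : Int))).sum := by
  induction W1 with
  | nil => simp
  | cons w rest ih =>
    have h : ∀ v ∈ W2, (((w :: rest).count v : Nat) : Int)
        = (rest.count v : Int) + (if v = w then (1 : Int) else 0) := by
      intro v _
      by_cases hv : v = w
      · subst hv; simp
      · have : (w == v) = false := by simpa [beq_eq_false_iff_ne] using fun h => hv h.symm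
        simp [List.count_cons, this, hv]
    rw [List.map_cons, List.sum_cons, ih, List.map_congr_left h, PySem.List.sum_map_add_int]
    have hsum : (W2.map fun v => if v = w then (1 : Int) else 0).sum = (W2.count w : Int) := by
      rw [← sum_indicator_count W2 w]
      refine congrArg List.sum (List.map_congr_left ?_)
      intro v _
      by_cases hv : v = w
      · simp [hv]
      · simp [hv, Ne.symm hv]
    rw [hsum]; ring

theorem substring_kernel_eq (s1 s2 : String) (k : Int) :
    substring_kernel s1 s2 k = substring_kernel_alt s1 s2 k := by
  simp only [substring_kernel, substring_kernel_alt]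
  by_cases hc : k ≤ 0 ∨ k > PySem.Chars.len (PySem.Chars.upper s1.toList)
      ∨ k > PySem.Chars.len (PySem.Chars.upper s2.toList)
  · simp only [if_pos hc]
  · simp only [if_neg hc, skCount_eq_counter, PySem.Dict.items_counter,
      PySem.List.foldl_add, zero_add]
    -- A's side: Σ over dedup windows of cnt1*cnt2
    have hA : ((PySem.Set.ofList (skWindows (PySem.Chars.upper s1.toList) k)).map
        (fun w => ((skWindows (PySem.Chars.upper s1.toList) k).count w : Int)
          * ((skWindows (PySem.Chars.upper s2.toList) k).count w : Int))).sum
        = (((PySem.Set.ofList (skWindows (PySem.Chars.upper s1.toList) k)).map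
            (fun k_1 => (k_1, ((skWindows (PySem.Chars.upper s1.toList) k).count k_1 : Int)))).map
            (fun p => p.2 * (PySem.Dict.counter (skWindows (PySem.Chars.upper s2.toList) k)).getD p.1 0)).sum := by
      rw [List.map_map]
      exact congrArg List.sum (List.map_congr_left (by
        intro w _; simp [PySem.Dict.getD_counter]))
    rw [← hA]
    -- B's side: nested foldl = Σ_{w ∈ W1} count_{W2}(w)
    have hInner : ∀ (w : String) (t : Int),
        (PySem.List.pyRange 0 (PySem.Chars.len (PySem.Chars.upper s2.toList) - k + 1) 1).foldl
          (fun t j => if w = String.ofList (PySem.List.slice (PySem.Chars.upper s2.toList) (some j) (some (j + k))) then t + 1 else t) t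
        = t + ((skWindows (PySem.Chars.upper s2.toList) k).count w : Int) := by
      intro w t
      have hfn : (fun (t : Int) (j : Int) =>
          if w = String.ofList (PySem.List.slice (PySem.Chars.upper s2.toList) (some j) (some (j + k))) then t + 1 else t)
          = fun t j => t + (if w = String.ofList (PySem.List.slice (PySem.Chars.upper s2.toList) (some j) (some (j + k))) then (1 : Int) else 0) := by
        funext t j; by_cases h : w = String.ofList (PySem.List.slice (PySem.Chars.upper s2.toList) (some j) (some (j + k))) <;> simp [h]
      rw [hfn, PySem.List.foldl_add]
      congr 1
      rw [skWindows, ← sum_indicator_count, List.map_map]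
      rfl
    have hB : (PySem.List.pyRange 0 (PySem.Chars.len (PySem.Chars.upper s1.toList) - k + 1) 1).foldl
        (fun total i =>
          let w := String.ofList (PySem.List.slice (PySem.Chars.upper s1.toList) (some i) (some (i + k)))
          (PySem.List.pyRange 0 (PySem.Chars.len (PySem.Chars.upper s2.toList) - k + 1) 1).foldl
            (fun t j => if w = String.ofList (PySem.List.slice (PySem.Chars.upper s2.toList) (some j) (some (j + k))) then t + 1 else t) total)
        0
        = ((skWindows (PySem.Chars.upper s1.toList) k).map
            (fun w => ((skWindows (PySem.Chars.upper s2.toList) k).count w : Int))).sum := by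
      simp only [hInner, skWindows, List.map_map, PySem.List.foldl_add, zero_add]
      rfl
    rw [hB, sum_count_symm, ← double_count]

-- ===== VERDICT =====
theorem substring_kernel_spec : Claim_equal_substring_kernel := by
  intro s1 s2 k _
  unfold Spec_substring_kernel
  exact substring_kernel_eq s1 s2 k
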